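-- pv_equiv track=rewrite | github.com/arifromadhan19/Codility | bukalapak/slice_bi_valued.py | solution
-- ===== SOURCE A (Python) =====
-- def solution(A):
--     temp = []
--     for i in range(len(A)):
--         for j in range(len(A)):
--             if i < j < len(A):
--                 d = set(A[i:j + 1])
--                 unique = len(d)
--                 if unique <= 2:
--                     temp.append(set(A[i:j + 1]))
--     return  len(set(map(frozenset, temp)))
-- ===== SOURCE B (Python) =====
-- def solution(A):
--     # every contiguous subarray of length >= 2 with <= 2 distinct values has the
--     # same value-set as some adjacent pair, so count distinct adjacent pair-sets
--     return len({(min(x, y), max(x, y)) for x, y in zip(A, A[1:])})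
-- ===== Notes on version B (the rewrite author's own statement) =====
-- stated objective: faster
-- what changed: Instead of enumerating all O(n^2) subarrays, building each value-set in O(n) and deduplicating frozensets, B counts distinct canonical (min,max) pairs of adjacent elements in one pass, which is exactly the set of value-sets of <=2-valued subarrays of length >= 2.
import Mathlib
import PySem

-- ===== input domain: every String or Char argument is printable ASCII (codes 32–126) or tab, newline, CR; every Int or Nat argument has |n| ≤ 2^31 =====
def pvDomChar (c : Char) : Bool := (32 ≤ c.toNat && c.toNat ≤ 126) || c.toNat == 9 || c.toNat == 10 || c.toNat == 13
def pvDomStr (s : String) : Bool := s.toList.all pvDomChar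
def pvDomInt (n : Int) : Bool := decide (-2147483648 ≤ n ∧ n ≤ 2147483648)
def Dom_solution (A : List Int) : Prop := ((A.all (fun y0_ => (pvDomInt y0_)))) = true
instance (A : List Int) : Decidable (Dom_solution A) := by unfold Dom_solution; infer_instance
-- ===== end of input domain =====

-- B replaces A's cubic enumeration of all subarray value-sets by a single pass over
-- adjacent pairs (objective: faster).

-- ===== PORT A =====
def solution (A : List Int) : Int :=
  let temp : List (PySem.Set Int) :=
    (PySem.List.pyRange 0 (PySem.List.len A) 1).foldl (fun temp i =>
      (PySem.List.pyRange 0 (PySem.List.len A) 1).foldl (fun temp j =>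
        if i < j ∧ j < PySem.List.len A then
          let d : PySem.Set Int := PySem.Set.ofList (PySem.List.slice A (some i) (some (j + 1)))
          let unique : Int := PySem.Set.len d
          if unique ≤ 2 then
            temp ++ [PySem.Set.ofList (PySem.List.slice A (some i) (some (j + 1)))]
          else temp
        else temp) temp) []
  -- len(set(map(frozenset, temp))): hand-ported (frozenset equality = set equality):
  -- first-occurrence dedup of temp under PySem.Set.equal, then its length — exact.
  PySem.List.len (temp.foldl (fun acc s =>
    if acc.any (fun t => PySem.Set.equal t s) then acc else acc ++ [s]) [])

-- ===== PORT B =====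
def solution_alt (A : List Int) : Int :=
  -- zip(A, A[1:]) = A.zip A.tail (both truncate to the shorter list)
  PySem.Set.len (PySem.Set.ofList ((A.zip A.tail).map (fun p => (min p.1 p.2, max p.1 p.2))))

-- ===== PRECONDITION & SPEC =====
def Spec_solution (A : List Int) (out : Int) : Prop := out = solution_alt A
instance (A : List Int) (out : Int) : Decidable (Spec_solution A out) := by unfold Spec_solution; infer_instance

-- ===== CLAIM (what is proved, stated in full; the proofs are below) =====
def Claim_equal_solution : Prop := ∀ (A : List Int), Dom_solution A → Spec_solution A (solution A)

-- ===== LEMMAS AND PROOFS =====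

def pvG (l : List Int) : Int × Int := (l.foldl min (l.headD 0), l.foldl max (l.headD 0))

theorem pvG_min_spec (l : List Int) (h : l ≠ []) :
    (pvG l).1 ∈ l ∧ ∀ y ∈ l, (pvG l).1 ≤ y := by
  match l with
  | x :: t =>
    simp only [pvG, List.headD_cons, List.foldl_cons, min_self]
    constructor
    · rcases PySem.List.foldl_min_mem t x with h1 | h1
      · rw [h1]; exact List.mem_cons_self
      · exact List.mem_cons_of_mem _ h1
    · intro y hy
      rcases List.mem_cons.mp hy with rfl | hy
      · exact (PySem.List.foldl_min_le t y).1
      · exact (PySem.List.foldl_min_le t x).2 y hy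

theorem pvG_max_spec (l : List Int) (h : l ≠ []) :
    (pvG l).2 ∈ l ∧ ∀ y ∈ l, y ≤ (pvG l).2 := by
  match l with
  | x :: t =>
    simp only [pvG, List.headD_cons, List.foldl_cons, max_self]
    constructor
    · rcases PySem.List.foldl_max_mem t x with h1 | h1
      · rw [h1]; exact List.mem_cons_self
      · exact List.mem_cons_of_mem _ h1
    · intro y hy
      rcases List.mem_cons.mp hy with rfl | hy
      · exact (PySem.List.le_foldl_max t y).1
      · exact (PySem.List.le_foldl_max t x).2 y hy

theorem pvG_mem_congr (l₁ l₂ : List Int) (h₁ : l₁ ≠ []) (h₂ : l₂ ≠ [])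
    (h : ∀ x, x ∈ l₁ ↔ x ∈ l₂) : pvG l₁ = pvG l₂ := by
  obtain ⟨hm1, hm1le⟩ := pvG_min_spec l₁ h₁
  obtain ⟨hm2, hm2le⟩ := pvG_min_spec l₂ h₂
  obtain ⟨hM1, hM1le⟩ := pvG_max_spec l₁ h₁
  obtain ⟨hM2, hM2le⟩ := pvG_max_spec l₂ h₂
  have e1 : (pvG l₁).1 = (pvG l₂).1 :=
    le_antisymm (hm1le _ ((h _).mpr hm2)) (hm2le _ ((h _).mp hm1))
  have e2 : (pvG l₁).2 = (pvG l₂).2 :=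
    le_antisymm (hM2le _ ((h _).mp hM1)) (hM1le _ ((h _).mpr hM2))
  exact Prod.ext e1 e2

-- members of a nonempty nodup list of length ≤ 2 are exactly the two pvG components
theorem pvMem_iff_of_short (s : List Int) (hn : s.Nodup) (hne : s ≠ []) (hl : s.length ≤ 2) :
    ∀ x, x ∈ s ↔ (x = (pvG s).1 ∨ x = (pvG s).2) := by
  match s with
  | [a] => intro x; simp [pvG]
  | [a, b] =>
    intro x
    have hab : a ≠ b := by simpa using hn
    rcases le_total a b with hle | hle <;>
      simp [pvG, min_def, max_def, hle] <;> tauto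

theorem pvEqual_iff_pvG (s t : List Int) (hs : s.Nodup) (hsne : s ≠ []) (hsl : s.length ≤ 2)
    (ht : t.Nodup) (htne : t ≠ []) (htl : t.length ≤ 2) :
    PySem.Set.equal s t = true ↔ pvG s = pvG t := by
  rw [PySem.Set.equal_iff]
  constructor
  · exact fun h => pvG_mem_congr s t hsne htne h
  · intro h x
    rw [pvMem_iff_of_short s hs hsne hsl, pvMem_iff_of_short t ht htne htl, h]
theorem pvMem_zip_adj {α : Type} (L : List α) (p : α × α) :
    p ∈ L.zip L.tail ↔ ∃ (k : Nat) (h : k + 1 < L.length), p = (L[k], L[k + 1]) := by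
  constructor
  · intro hp
    obtain ⟨k, hk, he⟩ := List.mem_iff_getElem.mp hp
    have hk' : k + 1 < L.length := by
      simp only [List.length_zip, List.length_tail] at hk
      omega
    refine ⟨k, hk', ?_⟩
    rw [← he]
    rw [List.getElem_zip]
    simp [List.getElem_tail]
  · rintro ⟨k, hk, rfl⟩
    apply List.mem_iff_getElem.mpr
    refine ⟨k, ?_, ?_⟩
    · simp only [List.length_zip, List.length_tail]; omega
    · rw [List.getElem_zip]; simp [List.getElem_tail]

theorem pvExists_adj_ne (l : List Int) (h : ∃ x ∈ l, ∃ y ∈ l, x ≠ y) :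
    ∃ p ∈ l.zip l.tail, p.1 ≠ p.2 := by
  induction l with
  | nil => simp at h
  | cons x t ih =>
    match t, ih with
    | [], _ =>
      obtain ⟨a, ha, b, hb, hab⟩ := h
      simp at ha hb; subst ha; subst hb; exact absurd rfl hab
    | y :: t, ih =>
      by_cases hxy : x = y
      · subst hxy
        have h' : ∃ a ∈ x :: t, ∃ b ∈ x :: t, a ≠ b := by
          obtain ⟨a, ha, b, hb, hab⟩ := h
          rcases List.mem_cons.mp ha with rfl | ha
          · rcases List.mem_cons.mp hb with rfl | hb
            · exact absurd rfl hab
            · exact ⟨a, List.mem_cons_self, b, hb, hab⟩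
          · exact ⟨a, ha, b, by
              rcases List.mem_cons.mp hb with rfl | hb
              exacts [List.mem_cons_self, hb], hab⟩
        obtain ⟨p, hp, hpne⟩ := ih h'
        exact ⟨p, List.mem_cons_of_mem _ hp, hpne⟩
      · exact ⟨(x, y), by simp, hxy⟩

theorem pvThree_mem {s : List Int} (hn : s.Nodup) (hl : s.length ≤ 2)
    {a b c : Int} (ha : a ∈ s) (hb : b ∈ s) (hc : c ∈ s) : a = b ∨ a = c ∨ b = c := by
  match s with
  | [] => simp at ha
  | [u] => simp at ha hb; subst ha; subst hb; left; rfl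
  | [u, v] =>
    simp at ha hb hc
    rcases ha with rfl | rfl <;> rcases hb with rfl | rfl <;> rcases hc with rfl | rfl <;> tauto

theorem pvCore (l : List Int) (h2 : 2 ≤ l.length) (hset : (PySem.Set.ofList l).length ≤ 2) :
    ∃ p ∈ l.zip l.tail, pvG l = (min p.1 p.2, max p.1 p.2) := by
  have hne : l ≠ [] := by intro h; subst h; simp at h2
  obtain ⟨hmmem, hmle⟩ := pvG_min_spec l hne
  obtain ⟨hMmem, hMle⟩ := pvG_max_spec l hne
  by_cases hmM : (pvG l).1 = (pvG l).2
  · -- all elements equal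
    match l, h2 with
    | x :: y :: t, _ =>
      have hx : x = (pvG (x :: y :: t)).1 := le_antisymm
        (by rw [hmM]; exact hMle x (by simp)) (hmle x (by simp))
      have hy : y = (pvG (x :: y :: t)).1 := le_antisymm
        (by rw [hmM]; exact hMle y (by simp)) (hmle y (by simp))
      refine ⟨(x, y), by simp, ?_⟩
      have : x = y := hx.trans hy.symm
      subst this
      refine Prod.ext ?_ ?_
      · simpa using hx.symm
      · simpa [← hmM] using hx.symm
  · -- two distinct values: some adjacent pair differs, and it must be {min, max}
    have hall : ∀ x ∈ l, x = (pvG l).1 ∨ x = (pvG l).2 := by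
      intro x hx
      have := pvThree_mem (PySem.Set.nodup_ofList l) hset
        ((PySem.Set.mem_ofList l x).mpr hx) ((PySem.Set.mem_ofList l _).mpr hmmem)
        ((PySem.Set.mem_ofList l _).mpr hMmem)
      tauto
    obtain ⟨p, hp, hpne⟩ := pvExists_adj_ne l ⟨_, hmmem, _, hMmem, hmM⟩
    have hp1 : p.1 ∈ l := (List.of_mem_zip hp).1
    have hp2 : p.2 ∈ l := List.mem_of_mem_tail (List.of_mem_zip hp).2
    have hlt : (pvG l).1 ≤ (pvG l).2 := hmle _ hMmem
    refine ⟨p, hp, ?_⟩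
    rcases hall p.1 hp1 with e1 | e1 <;> rcases hall p.2 hp2 with e2 | e2
    · exact absurd (e1.trans e2.symm) hpne
    · rw [e1, e2, min_eq_left hlt, max_eq_right hlt]
    · rw [e1, e2, min_eq_right hlt, max_eq_left hlt]
    · exact absurd (e1.trans e2.symm) hpne

def pvSub (A : List Int) (i j : Int) : List Int := PySem.List.slice A (some i) (some (j + 1))

def pvSetOf (A : List Int) (i j : Int) : PySem.Set Int := PySem.Set.ofList (pvSub A i j)

def pvTempL (A : List Int) : List (PySem.Set Int) :=
  (PySem.List.pyRange 0 (PySem.List.len A) 1).flatMap (fun i =>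
    ((PySem.List.pyRange 0 (PySem.List.len A) 1).filter (fun j =>
      decide (i < j ∧ j < PySem.List.len A ∧
        PySem.Set.len (PySem.Set.ofList (pvSub A i j)) ≤ 2))).map (fun j => pvSetOf A i j))

theorem pvLen_eq {α : Type} (A : List α) : PySem.List.len A = (A.length : Int) := by
  simp [PySem.List.len]

theorem pvSetLen_eq {α : Type} (s : PySem.Set α) : PySem.Set.len s = (s.length : Int) := by
  simp [PySem.Set.len, PySem.List.len]

theorem pvTemp_eq (A : List Int) :
    (PySem.List.pyRange 0 (PySem.List.len A) 1).foldl (fun temp i =>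
      (PySem.List.pyRange 0 (PySem.List.len A) 1).foldl (fun temp j =>
        if i < j ∧ j < PySem.List.len A then
          if PySem.Set.len (PySem.Set.ofList (PySem.List.slice A (some i) (some (j + 1)))) ≤ 2 then
            temp ++ [PySem.Set.ofList (PySem.List.slice A (some i) (some (j + 1)))]
          else temp
        else temp) temp) ([] : List (PySem.Set Int)) = pvTempL A := by
  have hinner : ∀ (i : Int) (acc : List (PySem.Set Int)),
      (PySem.List.pyRange 0 (PySem.List.len A) 1).foldl (fun temp j =>
        if i < j ∧ j < PySem.List.len A then
          if PySem.Set.len (PySem.Set.ofList (PySem.List.slice A (some i) (some (j + 1)))) ≤ 2 then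
            temp ++ [PySem.Set.ofList (PySem.List.slice A (some i) (some (j + 1)))]
          else temp
        else temp) acc
      = acc ++ ((PySem.List.pyRange 0 (PySem.List.len A) 1).filter (fun j =>
          decide (i < j ∧ j < PySem.List.len A ∧
            PySem.Set.len (PySem.Set.ofList (pvSub A i j)) ≤ 2))).map (fun j => pvSetOf A i j) := by
    intro i acc
    rw [show (fun (temp : List (PySem.Set Int)) (j : Int) =>
        if i < j ∧ j < PySem.List.len A then
          if PySem.Set.len (PySem.Set.ofList (PySem.List.slice A (some i) (some (j + 1)))) ≤ 2 then
            temp ++ [PySem.Set.ofList (PySem.List.slice A (some i) (some (j + 1)))]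
          else temp
        else temp)
        = (fun temp j => if (i < j ∧ j < PySem.List.len A ∧
            PySem.Set.len (PySem.Set.ofList (pvSub A i j)) ≤ 2) then temp ++ [pvSetOf A i j]
          else temp) from ?_]
    · exact PySem.List.foldl_append_ite _ _ _ _
    · funext temp j
      simp only [pvSub, pvSetOf]
      by_cases h1 : i < j ∧ j < PySem.List.len A
      · by_cases h2 : PySem.Set.len (PySem.Set.ofList (PySem.List.slice A (some i) (some (j + 1)))) ≤ 2
        · rw [if_pos h1, if_pos h2, if_pos ⟨h1.1, h1.2, h2⟩]
        · rw [if_pos h1, if_neg h2, if_neg (by tauto)]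
      · rw [if_neg h1, if_neg (by tauto)]
  rw [show (fun (temp : List (PySem.Set Int)) (i : Int) =>
      (PySem.List.pyRange 0 (PySem.List.len A) 1).foldl (fun temp j =>
        if i < j ∧ j < PySem.List.len A then
          if PySem.Set.len (PySem.Set.ofList (PySem.List.slice A (some i) (some (j + 1)))) ≤ 2 then
            temp ++ [PySem.Set.ofList (PySem.List.slice A (some i) (some (j + 1)))]
          else temp
        else temp) temp)
      = (fun (temp : List (PySem.Set Int)) (i : Int) => temp ++
          ((PySem.List.pyRange 0 (PySem.List.len A) 1).filter (fun j =>
            decide (i < j ∧ j < PySem.List.len A ∧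
              PySem.Set.len (PySem.Set.ofList (pvSub A i j)) ≤ 2))).map (fun j => pvSetOf A i j))
      from funext fun temp => funext fun i => hinner i temp]
  rw [PySem.List.foldl_append_eq_flatMap]
  rfl

theorem pvMem_tempL (A : List Int) (s : PySem.Set Int) :
    s ∈ pvTempL A ↔ ∃ i j : Int, 0 ≤ i ∧ i < j ∧ j < PySem.List.len A ∧
      PySem.Set.len (PySem.Set.ofList (pvSub A i j)) ≤ 2 ∧ s = pvSetOf A i j := by
  simp only [pvTempL, List.mem_flatMap, List.mem_map, List.mem_filter,
    PySem.List.mem_pyRange_one, decide_eq_true_eq]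
  constructor
  · rintro ⟨i, ⟨hi0, _⟩, j, ⟨⟨hj0, _⟩, hij, hjn, hle⟩, rfl⟩
    exact ⟨i, j, hi0, hij, hjn, hle, rfl⟩
  · rintro ⟨i, j, hi0, hij, hjn, hle, rfl⟩
    exact ⟨i, ⟨hi0, by omega⟩, j, ⟨⟨by omega, hjn⟩, hij, hjn, hle⟩, rfl⟩

theorem pvSub_eq (A : List Int) {i j : Int} (hi0 : 0 ≤ i) (hij : i < j) :
    pvSub A i j = (A.drop i.toNat).take (j.toNat + 1 - i.toNat) := by
  rw [pvSub, PySem.List.slice_toNat A hi0 (by omega)]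
  congr 1
  omega

theorem pvSub_len (A : List Int) {i j : Int} (hi0 : 0 ≤ i) (hij : i < j)
    (hjn : j < PySem.List.len A) : 2 ≤ (pvSub A i j).length := by
  have hjn' : j < (A.length : Int) := by rwa [pvLen_eq] at hjn
  rw [pvSub_eq A hi0 hij]
  simp only [List.length_take, List.length_drop]
  omega

theorem pvOfList_ne_nil (l : List Int) (h : l ≠ []) : PySem.Set.ofList l ≠ [] := by
  match l, h with
  | x :: t, _ =>
    exact List.ne_nil_of_mem ((PySem.Set.mem_ofList (x :: t) x).mpr List.mem_cons_self)

theorem pvTemp_prop (A : List Int) (s : PySem.Set Int) (hs : s ∈ pvTempL A) :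
    s.Nodup ∧ s ≠ [] ∧ s.length ≤ 2 := by
  obtain ⟨i, j, hi0, hij, hjn, hle, rfl⟩ := (pvMem_tempL A s).mp hs
  have h2 : 2 ≤ (pvSub A i j).length := pvSub_len A hi0 hij hjn
  have hne : pvSub A i j ≠ [] := by
    intro h; rw [h] at h2; simp at h2
  refine ⟨PySem.Set.nodup_ofList _, ?_, ?_⟩
  · unfold pvSetOf
    exact pvOfList_ne_nil _ hne
  · rw [pvSetLen_eq] at hle
    unfold pvSetOf
    omega

theorem pvGetElem_sub (A : List Int) {i j : Int} (hi0 : 0 ≤ i) (hij : i < j)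
    (k : Nat) (hk : k < (pvSub A i j).length) (hb : i.toNat + k < A.length) :
    (pvSub A i j)[k] = A[i.toNat + k] := by
  rw [List.getElem_eq_iff, pvSub_eq A hi0 hij]
  have hk' : k < j.toNat + 1 - i.toNat := by
    rw [pvSub_eq A hi0 hij] at hk
    simp only [List.length_take, List.length_drop] at hk
    omega
  rw [List.getElem?_take_of_lt hk', List.getElem?_drop]
  exact List.getElem?_eq_getElem _

theorem pvImage (A : List Int) (z : Int × Int) :
    z ∈ (pvTempL A).map pvG ↔
      z ∈ (A.zip A.tail).map (fun p => (min p.1 p.2, max p.1 p.2)) := by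
  rw [List.mem_map, List.mem_map]
  constructor
  · rintro ⟨s, hs, rfl⟩
    obtain ⟨i, j, hi0, hij, hjn, hle, rfl⟩ := (pvMem_tempL A s).mp hs
    have h2 : 2 ≤ (pvSub A i j).length := pvSub_len A hi0 hij hjn
    have hne : pvSub A i j ≠ [] := by intro h; rw [h] at h2; simp at h2
    have hsetne : pvSetOf A i j ≠ [] := by
      unfold pvSetOf
      exact pvOfList_ne_nil _ hne
    have hgeq : pvG (pvSetOf A i j) = pvG (pvSub A i j) :=
      pvG_mem_congr _ _ hsetne hne (fun x => PySem.Set.mem_ofList _ x)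
    have hsl : (PySem.Set.ofList (pvSub A i j)).length ≤ 2 := by
      rw [pvSetLen_eq] at hle; omega
    obtain ⟨p, hp, hG⟩ := pvCore (pvSub A i j) h2 hsl
    obtain ⟨k, hk, rfl⟩ := (pvMem_zip_adj _ _).mp hp
    have hbound : i.toNat + k + 1 < A.length := by
      have hk2 := hk
      rw [pvSub_eq A hi0 hij] at hk2
      simp only [List.length_take, List.length_drop] at hk2
      omega
    have e1 := pvGetElem_sub A hi0 hij k (by omega) (by omega)
    have e2 := pvGetElem_sub A hi0 hij (k + 1) hk (by omega)
    refine ⟨(A[i.toNat + k], A[i.toNat + k + 1]), ?_, ?_⟩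
    · exact (pvMem_zip_adj A _).mpr ⟨i.toNat + k, hbound, rfl⟩
    · rw [hgeq, hG]
      simp only [e1, e2]
      rfl
  · rintro ⟨p, hp, rfl⟩
    obtain ⟨k, hk, rfl⟩ := (pvMem_zip_adj A p).mp hp
    refine ⟨pvSetOf A (k : Int) ((k : Int) + 1), ?_, ?_⟩
    · refine (pvMem_tempL A _).mpr ⟨(k : Int), (k : Int) + 1, by omega, by omega, ?_, ?_, rfl⟩
      · rw [pvLen_eq]; omega
      · rw [pvSetLen_eq]
        have := PySem.Set.length_ofList_le (pvSub A (k : Int) ((k : Int) + 1))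
        have hsl : (pvSub A (k : Int) ((k : Int) + 1)).length = 2 := by
          rw [pvSub_eq A (by omega) (by omega)]
          simp only [List.length_take, List.length_drop]
          omega
      
        omega
    · have hl : pvSub A (k : Int) ((k : Int) + 1) = [A[k], A[k + 1]] := by
        rw [pvSub_eq A (by omega) (by omega)]
        have h1 : ((k : Int)).toNat = k := by omega
        have h2 : ((k : Int) + 1).toNat = k + 1 := by omega
        rw [h1, h2, show k + 1 + 1 - k = 2 from by omega]
        rw [List.drop_eq_getElem_cons (show k < A.length by omega)]
        rw [List.drop_eq_getElem_cons (show k + 1 < A.length by omega)]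
        rfl
      have hgne : pvSetOf A (k : Int) ((k : Int) + 1) ≠ [] := by
        unfold pvSetOf
        rw [hl]
        exact pvOfList_ne_nil _ (by simp)
      have hgeq : pvG (pvSetOf A (k : Int) ((k : Int) + 1)) = pvG [A[k], A[k + 1]] := by
        refine pvG_mem_congr _ _ hgne (by simp) ?_
        intro x
        rw [pvSetOf, hl]
        exact PySem.Set.mem_ofList _ x
      rw [hgeq]
      simp [pvG]

theorem pvDedup_inv (g : List Int → Int × Int) (R : List Int → List Int → Bool) :
    ∀ (l acc : List (List Int)),
      (∀ x y, (x ∈ acc ∨ x ∈ l) → (y ∈ acc ∨ y ∈ l) → (R x y = true ↔ g x = g y)) →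
      (acc.map g).Nodup →
      (((l.foldl (fun acc s => if acc.any (fun t => R t s) then acc else acc ++ [s]) acc).map g).Nodup ∧
       ∀ z, (z ∈ (l.foldl (fun acc s => if acc.any (fun t => R t s) then acc else acc ++ [s]) acc).map g ↔
             z ∈ acc.map g ∨ z ∈ l.map g)) := by
  intro l
  induction l with
  | nil => intro acc h hnd; simp [hnd]
  | cons s l ih =>
    intro acc h hnd
    simp only [List.foldl_cons]
    by_cases hany : acc.any (fun t => R t s) = true
    · rw [if_pos hany]
      have hgs : g s ∈ acc.map g := by
        obtain ⟨t, ht, hR⟩ := List.any_eq_true.mp hany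
        exact List.mem_map.mpr ⟨t, ht, (h t s (Or.inl ht) (Or.inr List.mem_cons_self)).mp hR⟩
      obtain ⟨ih1, ih2⟩ := ih acc
        (fun x y hx hy => h x y
          (by rcases hx with hx | hx; exacts [Or.inl hx, Or.inr (List.mem_cons_of_mem _ hx)])
          (by rcases hy with hy | hy; exacts [Or.inl hy, Or.inr (List.mem_cons_of_mem _ hy)])) hnd
      refine ⟨ih1, fun z => ?_⟩
      rw [ih2]
      simp only [List.map_cons, List.mem_cons]
      constructor
      · tauto
      · rintro (hz | hz | hz)
        · tauto
        · subst hz; exact Or.inl hgs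
        · tauto
    · rw [if_neg hany]
      have hgs : g s ∉ acc.map g := by
        intro hmem
        obtain ⟨t, ht, hgt⟩ := List.mem_map.mp hmem
        have : R t s = true := (h t s (Or.inl ht) (Or.inr List.mem_cons_self)).mpr hgt
        exact hany (List.any_eq_true.mpr ⟨t, ht, this⟩)
      have hnd' : ((acc ++ [s]).map g).Nodup := by
        rw [List.map_append, List.nodup_append]
        refine ⟨hnd, by simp, ?_⟩
        simp only [List.map_cons, List.map_nil]
        intro a ha
        simp only [List.mem_cons, List.not_mem_nil, or_false]
        intro b hb
        subst hb
        intro e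
        subst e
        exact hgs ha
      obtain ⟨ih1, ih2⟩ := ih (acc ++ [s])
        (fun x y hx hy => h x y
          (by rcases hx with hx | hx
              · rcases List.mem_append.mp hx with hx | hx
                · exact Or.inl hx
                · simp at hx; subst hx; exact Or.inr List.mem_cons_self
              · exact Or.inr (List.mem_cons_of_mem _ hx))
          (by rcases hy with hy | hy
              · rcases List.mem_append.mp hy with hy | hy
                · exact Or.inl hy
                · simp at hy; subst hy; exact Or.inr List.mem_cons_self
              · exact Or.inr (List.mem_cons_of_mem _ hy))) hnd'
      refine ⟨ih1, fun z => ?_⟩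
      rw [ih2]
      simp only [List.map_append, List.map_cons, List.map_nil, List.mem_append,
        List.mem_cons, List.mem_singleton]
      tauto

-- ===== VERDICT (by name: the statement is the Claim_ definition above) =====
theorem solution_spec : Claim_equal_solution := by
  unfold Claim_equal_solution Spec_solution
  intro A _
  have h0 : solution A = PySem.List.len ((pvTempL A).foldl
      (fun acc s => if acc.any (fun t => PySem.Set.equal t s) then acc else acc ++ [s]) []) := by
    rw [show solution A = PySem.List.len
        (((PySem.List.pyRange 0 (PySem.List.len A) 1).foldl (fun temp i =>
          (PySem.List.pyRange 0 (PySem.List.len A) 1).foldl (fun temp j =>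
            if i < j ∧ j < PySem.List.len A then
              if PySem.Set.len (PySem.Set.ofList (PySem.List.slice A (some i) (some (j + 1)))) ≤ 2 then
                temp ++ [PySem.Set.ofList (PySem.List.slice A (some i) (some (j + 1)))]
              else temp
            else temp) temp) ([] : List (PySem.Set Int))).foldl
          (fun acc s => if acc.any (fun t => PySem.Set.equal t s) then acc else acc ++ [s]) [])
      from rfl]
    rw [pvTemp_eq]
  have hR : ∀ x y : List Int, (x ∈ ([] : List (List Int)) ∨ x ∈ pvTempL A) →
      (y ∈ ([] : List (List Int)) ∨ y ∈ pvTempL A) →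
      (PySem.Set.equal x y = true ↔ pvG x = pvG y) := by
    rintro x y (hx | hx) (hy | hy)
    · simp at hx
    · simp at hx
    · simp at hy
    · obtain ⟨x1, x2, x3⟩ := pvTemp_prop A x hx
      obtain ⟨y1, y2, y3⟩ := pvTemp_prop A y hy
      exact pvEqual_iff_pvG x y x1 x2 x3 y1 y2 y3
  obtain ⟨hnd, hmem⟩ := pvDedup_inv pvG PySem.Set.equal (pvTempL A) [] hR (by simp)
  have hperm := (List.perm_ext_iff_of_nodup hnd (PySem.Set.nodup_ofList
      ((A.zip A.tail).map (fun p => (min p.1 p.2, max p.1 p.2))))).mpr (fun z => by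
    rw [hmem z, PySem.Set.mem_ofList]
    simp only [List.map_nil, List.not_mem_nil, false_or]
    exact pvImage A z)
  have hlen := hperm.length_eq
  rw [List.length_map] at hlen
  rw [h0]
  unfold solution_alt
  rw [pvLen_eq, pvSetLen_eq, hlen]
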